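-- pv_equiv track=rewrite | github.com/MaysaraCS/Python | build_a_translator.py | tranlate
-- ===== SOURCE A (Python) =====
-- def tranlate(phrase):
--     translation = ""
--     for letter in phrase:
--         if letter.lower() in "aeiou":
--             if letter.isupper():
--                 translation = translation + "1"
--             else:
--                translation = translation + "0"
--         else:
--             translation = translation + letter
--     return translation
-- ===== SOURCE B (Python) =====
-- def tranlate(phrase):
--     table = str.maketrans("aeiouAEIOU", "0000011111")
--     return phrase.translate(table)
-- ===== Notes on version B (the rewrite author's own statement) =====
-- stated objective: faster
-- what changed: Replaces the per-character loop with nested case tests and repeated string concatenation by a translation table built once with str.maketrans and a single phrase.translate call.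
import Mathlib
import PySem

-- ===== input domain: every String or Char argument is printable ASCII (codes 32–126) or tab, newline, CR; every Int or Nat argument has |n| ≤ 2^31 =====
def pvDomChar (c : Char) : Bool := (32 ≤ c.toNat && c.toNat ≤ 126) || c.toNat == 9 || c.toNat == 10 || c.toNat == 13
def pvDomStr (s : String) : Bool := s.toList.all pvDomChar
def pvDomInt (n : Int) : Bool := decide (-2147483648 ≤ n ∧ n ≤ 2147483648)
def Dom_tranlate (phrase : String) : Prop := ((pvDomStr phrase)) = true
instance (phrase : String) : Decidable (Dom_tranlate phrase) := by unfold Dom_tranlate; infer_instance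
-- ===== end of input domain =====

-- B builds a vowel→digit translation table once and applies it in one map (str.translate),
-- instead of A's per-character loop with nested case tests and repeated string concatenation.

-- ===== PORT A =====
def tranlate (phrase : String) : String :=
  String.mk (phrase.toList.foldl
    (fun translation letter =>
      if PySem.Chars.isIn (PySem.Chars.lower [letter]) "aeiou".toList then
        if PySem.Chars.isupper letter then translation ++ ['1'] else translation ++ ['0']
      else translation ++ [letter])
    [])

-- ===== PORT B =====
-- str.maketrans("aeiouAEIOU", "0000011111") as an association list of characters
def pvTrTable : List (Char × Char) := "aeiouAEIOU".toList.zip "0000011111".toList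

-- phrase.translate(table): each character is looked up in the table, absent ones pass through
def tranlate_alt (phrase : String) : String :=
  String.mk (phrase.toList.map (fun c => (pvTrTable.lookup c).getD c))

-- ===== PRECONDITION & SPEC =====
def Spec_tranlate (phrase : String) (out : String) : Prop := out = tranlate_alt phrase
instance (phrase : String) (out : String) : Decidable (Spec_tranlate phrase out) := by unfold Spec_tranlate; infer_instance

-- ===== CLAIM (what is proved, stated in full; the proofs are below) =====
def Claim_equal_tranlate : Prop := ∀ (phrase : String), Dom_tranlate phrase → Spec_tranlate phrase (tranlate phrase)

-- ===== LEMMAS AND PROOFS =====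

-- lowerChar c = v (a lowercase letter with uppercase partner V) iff c is v or V
theorem pv_lowerChar_eq_iff (c v V : Char)
    (h1 : PySem.Chars.isupper v = false) (h2 : PySem.Chars.isupper V = true)
    (h3 : v.toNat = V.toNat + 32) :
    PySem.Chars.lowerChar c = v ↔ (c = v ∨ c = V) := by
  unfold PySem.Chars.lowerChar
  split
  · rename_i hup
    have hb : 65 ≤ c.toNat ∧ c.toNat ≤ 90 := by
      unfold PySem.Chars.isupper at hup
      have h := hup
      simp only [Bool.and_eq_true, decide_eq_true_eq] at h
      exact ⟨by simpa [Char.le_def] using h.1, by simpa [Char.le_def] using h.2⟩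
    have hval : (Char.ofNat (c.toNat + 32)).toNat = c.toNat + 32 := by
      rw [Char.toNat_ofNat, if_pos]
      exact Or.inl (by omega)
    constructor
    · intro he
      right
      have ht := congrArg Char.toNat he
      rw [hval] at ht
      have hcv : c.toNat = V.toNat := by omega
      exact Char.ext (UInt32.toNat_inj.mp hcv)
    · rintro (h | h)
      · rw [h] at hup; rw [hup] at h1; exact absurd h1 (by simp)
      · have hcV : c.toNat = V.toNat := by rw [h]
        have hvv : (Char.ofNat (c.toNat + 32)).toNat = v.toNat := by
          rw [Char.toNat_ofNat, if_pos (Or.inl (by omega))]; omega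
        exact Char.ext (UInt32.toNat_inj.mp hvv)
  · rename_i hup
    constructor
    · intro h; exact Or.inl h
    · rintro (h | h)
      · exact h
      · rw [h] at hup; rw [h2] at hup; exact absurd rfl hup

-- A's test `letter.lower() in "aeiou"` holds exactly on the ten vowel characters
theorem pv_cond_iff (c : Char) :
    PySem.Chars.isIn (PySem.Chars.lower [c]) "aeiou".toList = true ↔
      (c = 'a' ∨ c = 'e' ∨ c = 'i' ∨ c = 'o' ∨ c = 'u' ∨
       c = 'A' ∨ c = 'E' ∨ c = 'I' ∨ c = 'O' ∨ c = 'U') := by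
  rw [PySem.Chars.isIn_iff_infix]
  show [PySem.Chars.lowerChar c] <:+: ['a', 'e', 'i', 'o', 'u'] ↔ _
  rw [List.singleton_infix_iff]
  simp only [List.mem_cons, List.not_mem_nil, or_false]
  rw [pv_lowerChar_eq_iff c 'a' 'A' (by decide) (by decide) (by decide),
      pv_lowerChar_eq_iff c 'e' 'E' (by decide) (by decide) (by decide),
      pv_lowerChar_eq_iff c 'i' 'I' (by decide) (by decide) (by decide),
      pv_lowerChar_eq_iff c 'o' 'O' (by decide) (by decide) (by decide),
      pv_lowerChar_eq_iff c 'u' 'U' (by decide) (by decide) (by decide)]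
  tauto

-- per-character agreement of A's branch with B's table lookup
theorem pv_perchar (c : Char) :
    (if PySem.Chars.isIn (PySem.Chars.lower [c]) "aeiou".toList then
       if PySem.Chars.isupper c then '1' else '0'
     else c) = (pvTrTable.lookup c).getD c := by
  by_cases hc : PySem.Chars.isIn (PySem.Chars.lower [c]) "aeiou".toList = true
  · rcases (pv_cond_iff c).mp hc with rfl | rfl | rfl | rfl | rfl | rfl | rfl | rfl | rfl | rfl <;> decide
  · rw [if_neg hc]
    have hne : ¬(c = 'a' ∨ c = 'e' ∨ c = 'i' ∨ c = 'o' ∨ c = 'u' ∨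
        c = 'A' ∨ c = 'E' ∨ c = 'I' ∨ c = 'O' ∨ c = 'U') :=
      fun h => hc ((pv_cond_iff c).mpr h)
    push Not at hne
    obtain ⟨n1, n2, n3, n4, n5, n6, n7, n8, n9, n10⟩ := hne
    have ht : pvTrTable = [('a','0'),('e','0'),('i','0'),('o','0'),('u','0'),
        ('A','1'),('E','1'),('I','1'),('O','1'),('U','1')] := by decide
    rw [ht]
    have e1 : (c == 'a') = false := beq_eq_false_iff_ne.mpr n1
    have e2 : (c == 'e') = false := beq_eq_false_iff_ne.mpr n2
    have e3 : (c == 'i') = false := beq_eq_false_iff_ne.mpr n3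
    have e4 : (c == 'o') = false := beq_eq_false_iff_ne.mpr n4
    have e5 : (c == 'u') = false := beq_eq_false_iff_ne.mpr n5
    have e6 : (c == 'A') = false := beq_eq_false_iff_ne.mpr n6
    have e7 : (c == 'E') = false := beq_eq_false_iff_ne.mpr n7
    have e8 : (c == 'I') = false := beq_eq_false_iff_ne.mpr n8
    have e9 : (c == 'O') = false := beq_eq_false_iff_ne.mpr n9
    have e10 : (c == 'U') = false := beq_eq_false_iff_ne.mpr n10
    simp [List.lookup, e1, e2, e3, e4, e5, e6, e7, e8, e9, e10]

-- ===== VERDICT (by name: the statement is the Claim_ definition above) =====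
theorem tranlate_spec : Claim_equal_tranlate := by
  intro phrase _
  show tranlate phrase = tranlate_alt phrase
  unfold tranlate tranlate_alt
  congr 1
  have hbody : (fun (translation : List Char) letter =>
      if PySem.Chars.isIn (PySem.Chars.lower [letter]) "aeiou".toList then
        if PySem.Chars.isupper letter then translation ++ ['1'] else translation ++ ['0']
      else translation ++ [letter])
    = (fun (acc : List Char) x => acc ++
        [if PySem.Chars.isIn (PySem.Chars.lower [x]) "aeiou".toList then
           if PySem.Chars.isupper x then '1' else '0'
         else x]) := by
    funext acc x
    split_ifs <;> rfl
  rw [hbody, PySem.List.foldl_append_singleton_eq_map]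
  simp only [List.nil_append]
  exact List.map_congr_left (fun c _ => pv_perchar c)
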